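-- pv_equiv track=rewrite | github.com/giovannicelotto/ggHbb | scripts/flatterScripts/efficiencyJetSelection_bdt.py | getTrueJets
-- ===== SOURCE A (Python) =====
-- def getTrueJets(nJet, Jet_genJetIdx, GenJet_partonMotherIdx, GenJet_partonFlavour, GenJet_partonMotherPdgId):
--     idxJet1, idxJet2 = -123, -124       # index of the first jet satisfying requirements
--     numberOfGoodJets=0              # number of jets satisfying requirements per event
--     for i in range(nJet):
--     # Find the jets from the signal
--         if (Jet_genJetIdx[i]>-1):               # jet is matched to gen
--             #if Jet_genJetIdx[i]<nGenJet:                               # some events have jetGenIdx > nGenJet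
--             if abs(GenJet_partonFlavour[Jet_genJetIdx[i]])==5:          # jet matched to genjet from b
--
--                 if GenJet_partonMotherPdgId[Jet_genJetIdx[i]]==25:      # jet parton mother is higgs (b comes from h)
--                     numberOfGoodJets=numberOfGoodJets+1
--                     assert numberOfGoodJets<=2, "Error numberOfGoodJets = %d"%numberOfGoodJets                 # check there are no more than 2 jets from higgs
--                     if idxJet1==-123:                                     # first match
--                         idxJet1=i
--                     elif GenJet_partonMotherIdx[Jet_genJetIdx[idxJet1]]==GenJet_partonMotherIdx[Jet_genJetIdx[i]]:  # second match. Also sisters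
--                         idxJet2=i
--     return idxJet1, idxJet2
-- ===== SOURCE B (Python) =====
-- def getTrueJets(nJet, Jet_genJetIdx, GenJet_partonMotherIdx, GenJet_partonFlavour, GenJet_partonMotherPdgId):
--     # A jet is "good" when it is gen-matched to a b-flavoured gen jet whose parton mother is the Higgs.
--     def _is_good(i):
--         g = Jet_genJetIdx[i]
--         return g > -1 and abs(GenJet_partonFlavour[g]) == 5 and GenJet_partonMotherPdgId[g] == 25
--     # Staged searches with early returns instead of one stateful accumulator scan:
--     # find the first good jet, then the next good jet after it.
--     j1 = next((i for i in range(nJet) if _is_good(i)), None)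
--     if j1 is None:
--         return -123, -124
--     j2 = next((i for i in range(j1 + 1, nJet) if _is_good(i)), None)
--     if j2 is not None and GenJet_partonMotherIdx[Jet_genJetIdx[j1]] == GenJet_partonMotherIdx[Jet_genJetIdx[j2]]:
--         return j1, j2
--     return j1, -124
-- ===== Notes on version B (the rewrite author's own statement) =====
-- stated objective: simpler
-- what changed: Replaces A's single full-range stateful scan (mutable idxJet1/idxJet2 and a good-jet counter with nested first/second-match branching and an in-loop assert) by two staged find-first searches with early returns: locate the first good jet, then the next good jet after it, then compare mothers; no counter, no mutable pair state, and the scan stops as soon as the second good jet is found.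
import Mathlib
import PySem

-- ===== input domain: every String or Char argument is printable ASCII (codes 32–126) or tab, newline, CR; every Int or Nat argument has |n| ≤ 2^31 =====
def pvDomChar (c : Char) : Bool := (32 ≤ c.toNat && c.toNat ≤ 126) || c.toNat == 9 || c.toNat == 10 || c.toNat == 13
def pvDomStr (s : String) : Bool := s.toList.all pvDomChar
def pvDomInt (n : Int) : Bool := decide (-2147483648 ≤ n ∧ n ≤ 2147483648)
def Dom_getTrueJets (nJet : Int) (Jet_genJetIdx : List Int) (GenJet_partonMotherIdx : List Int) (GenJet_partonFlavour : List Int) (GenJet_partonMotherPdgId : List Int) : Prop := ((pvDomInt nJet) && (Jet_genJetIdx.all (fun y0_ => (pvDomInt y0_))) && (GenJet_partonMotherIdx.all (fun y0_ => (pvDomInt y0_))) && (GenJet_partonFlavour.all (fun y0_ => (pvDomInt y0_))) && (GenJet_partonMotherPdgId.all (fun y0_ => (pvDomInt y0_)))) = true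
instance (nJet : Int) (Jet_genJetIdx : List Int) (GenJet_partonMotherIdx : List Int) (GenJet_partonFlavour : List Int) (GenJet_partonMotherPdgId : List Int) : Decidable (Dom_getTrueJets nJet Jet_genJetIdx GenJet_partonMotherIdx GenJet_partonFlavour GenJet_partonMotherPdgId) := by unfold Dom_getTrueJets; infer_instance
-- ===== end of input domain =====

-- B replaces A's single stateful accumulator scan by two staged find-first searches with
-- early returns (objective: simpler); equivalence is proved on Pre_, exactly the inputs
-- where A returns without raising.

-- ===== PORT A =====
-- A's loop: state (idxJet1, idxJet2, numberOfGoodJets); the assert never fires inside Pre_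
-- (Pre_ bounds the number of good jets by 2); Python raises outside Pre_.
def getTrueJets (nJet : Int) (Jet_genJetIdx : List Int) (GenJet_partonMotherIdx : List Int) (GenJet_partonFlavour : List Int) (GenJet_partonMotherPdgId : List Int) : Int × Int :=
  let st := (PySem.List.pyRange 0 nJet 1).foldl (fun (st : Int × Int × Int) i =>
    let idx1 := st.1
    let idx2 := st.2.1
    let n := st.2.2
    let g := PySem.List.pyGetD Jet_genJetIdx i 0
    if -1 < g then
      if ((PySem.List.pyGetD GenJet_partonFlavour g 0).natAbs : Int) = 5 then
        if PySem.List.pyGetD GenJet_partonMotherPdgId g 0 = 25 then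
          let n := n + 1
          if idx1 = -123 then (i, idx2, n)
          else if PySem.List.pyGetD GenJet_partonMotherIdx (PySem.List.pyGetD Jet_genJetIdx idx1 0) 0
                = PySem.List.pyGetD GenJet_partonMotherIdx (PySem.List.pyGetD Jet_genJetIdx i 0) 0 then
            (idx1, i, n)
          else (idx1, idx2, n)
        else st
      else st
    else st) ((-123 : Int), (-124 : Int), (0 : Int))
  (st.1, st.2.1)

-- ===== PORT B =====
-- Source B's helper _is_good(i)
def pvGoodJet (Jet_genJetIdx GenJet_partonFlavour GenJet_partonMotherPdgId : List Int) (i : Int) : Bool :=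
  let g := PySem.List.pyGetD Jet_genJetIdx i 0
  decide (-1 < g) && (PySem.List.pyGetD GenJet_partonFlavour g 0).natAbs == 5
    && PySem.List.pyGetD GenJet_partonMotherPdgId g 0 == 25

-- Source B: two staged `next(... if _is_good ...)` searches (ported as List.find? over the range)
def getTrueJets_alt (nJet : Int) (Jet_genJetIdx : List Int) (GenJet_partonMotherIdx : List Int) (GenJet_partonFlavour : List Int) (GenJet_partonMotherPdgId : List Int) : Int × Int :=
  match (PySem.List.pyRange 0 nJet 1).find? (pvGoodJet Jet_genJetIdx GenJet_partonFlavour GenJet_partonMotherPdgId) with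
  | none => (-123, -124)
  | some j1 =>
    match (PySem.List.pyRange (j1 + 1) nJet 1).find? (pvGoodJet Jet_genJetIdx GenJet_partonFlavour GenJet_partonMotherPdgId) with
    | none => (j1, -124)
    | some j2 =>
        if PySem.List.pyGetD GenJet_partonMotherIdx (PySem.List.pyGetD Jet_genJetIdx j1 0) 0
         = PySem.List.pyGetD GenJet_partonMotherIdx (PySem.List.pyGetD Jet_genJetIdx j2 0) 0
        then (j1, j2) else (j1, -124)

-- ===== PRECONDITION & SPEC =====
-- spec-side abbreviation: the list of good jet indices (used only by Pre_ and the proofs)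
def pvGoods (nJet : Int) (Jet_genJetIdx GenJet_partonFlavour GenJet_partonMotherPdgId : List Int) : List Int :=
  (PySem.List.pyRange 0 nJet 1).filter (pvGoodJet Jet_genJetIdx GenJet_partonFlavour GenJet_partonMotherPdgId)

-- Pre_ = exactly the inputs on which Python A returns: every loop index is in range of
-- Jet_genJetIdx, the gen-jet reads it performs are in range, at most 2 good jets (else the
-- assert fires), and when there are 2 the mother-index reads are in range.
def Pre_getTrueJets (nJet : Int) (Jet_genJetIdx : List Int) (GenJet_partonMotherIdx : List Int) (GenJet_partonFlavour : List Int) (GenJet_partonMotherPdgId : List Int) : Prop :=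
  nJet ≤ (Jet_genJetIdx.length : Int) ∧
  (∀ i ∈ PySem.List.pyRange 0 nJet 1,
     -1 < PySem.List.pyGetD Jet_genJetIdx i 0 →
       (PySem.List.pyGetD Jet_genJetIdx i 0 < (GenJet_partonFlavour.length : Int) ∧
        ((PySem.List.pyGetD GenJet_partonFlavour (PySem.List.pyGetD Jet_genJetIdx i 0) 0).natAbs = 5 →
          PySem.List.pyGetD Jet_genJetIdx i 0 < (GenJet_partonMotherPdgId.length : Int)))) ∧
  (pvGoods nJet Jet_genJetIdx GenJet_partonFlavour GenJet_partonMotherPdgId).length ≤ 2 ∧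
  (2 ≤ (pvGoods nJet Jet_genJetIdx GenJet_partonFlavour GenJet_partonMotherPdgId).length →
    ∀ i ∈ pvGoods nJet Jet_genJetIdx GenJet_partonFlavour GenJet_partonMotherPdgId,
      PySem.List.pyGetD Jet_genJetIdx i 0 < (GenJet_partonMotherIdx.length : Int))
instance (nJet : Int) (Jet_genJetIdx : List Int) (GenJet_partonMotherIdx : List Int) (GenJet_partonFlavour : List Int) (GenJet_partonMotherPdgId : List Int) : Decidable (Pre_getTrueJets nJet Jet_genJetIdx GenJet_partonMotherIdx GenJet_partonFlavour GenJet_partonMotherPdgId) := by unfold Pre_getTrueJets; infer_instance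

def pvWitness_getTrueJets : Int × List Int × List Int × List Int × List Int :=
  (3, [0, -1, 1], [7, 7], [5, -5], [25, 25])

def Spec_getTrueJets (nJet : Int) (Jet_genJetIdx : List Int) (GenJet_partonMotherIdx : List Int) (GenJet_partonFlavour : List Int) (GenJet_partonMotherPdgId : List Int) (out : Int × Int) : Prop := out = getTrueJets_alt nJet Jet_genJetIdx GenJet_partonMotherIdx GenJet_partonFlavour GenJet_partonMotherPdgId
instance (nJet : Int) (Jet_genJetIdx : List Int) (GenJet_partonMotherIdx : List Int) (GenJet_partonFlavour : List Int) (GenJet_partonMotherPdgId : List Int) (out : Int × Int) : Decidable (Spec_getTrueJets nJet Jet_genJetIdx GenJet_partonMotherIdx GenJet_partonFlavour GenJet_partonMotherPdgId out) := by unfold Spec_getTrueJets; infer_instance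

-- ===== CLAIM (what is proved, stated in full; the proofs are below) =====
def Claim_equal_getTrueJets : Prop := ∀ (nJet : Int) (Jet_genJetIdx : List Int) (GenJet_partonMotherIdx : List Int) (GenJet_partonFlavour : List Int) (GenJet_partonMotherPdgId : List Int), Dom_getTrueJets nJet Jet_genJetIdx GenJet_partonMotherIdx GenJet_partonFlavour GenJet_partonMotherPdgId → Pre_getTrueJets nJet Jet_genJetIdx GenJet_partonMotherIdx GenJet_partonFlavour GenJet_partonMotherPdgId → Spec_getTrueJets nJet Jet_genJetIdx GenJet_partonMotherIdx GenJet_partonFlavour GenJet_partonMotherPdgId (getTrueJets nJet Jet_genJetIdx GenJet_partonMotherIdx GenJet_partonFlavour GenJet_partonMotherPdgId)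

-- ===== LEMMAS AND PROOFS =====

-- A's loop body, let-free (definitionally equal to the body inside getTrueJets)
def pvStepA (J MI F MP : List Int) (st : Int × Int × Int) (i : Int) : Int × Int × Int :=
  if -1 < PySem.List.pyGetD J i 0 then
    if ((PySem.List.pyGetD F (PySem.List.pyGetD J i 0) 0).natAbs : Int) = 5 then
      if PySem.List.pyGetD MP (PySem.List.pyGetD J i 0) 0 = 25 then
        if st.1 = -123 then (i, st.2.1, st.2.2 + 1)
        else if PySem.List.pyGetD MI (PySem.List.pyGetD J st.1 0) 0
              = PySem.List.pyGetD MI (PySem.List.pyGetD J i 0) 0 then (st.1, i, st.2.2 + 1)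
        else (st.1, st.2.1, st.2.2 + 1)
      else st
    else st
  else st

lemma pvStepA_not_good (J MI F MP : List Int) (st : Int × Int × Int) (i : Int)
    (h : pvGoodJet J F MP i = false) : pvStepA J MI F MP st i = st := by
  unfold pvStepA
  unfold pvGoodJet at h
  simp only [Bool.and_eq_false_iff, beq_eq_false_iff_ne, decide_eq_false_iff_not] at h
  split_ifs with h1 h2 h3 h4 h5 <;> first
    | rfl
    | (exfalso
       rcases h with (h | h) | h
       · exact h h1
       · exact h (by exact_mod_cast h2)
       · exact h h3)

lemma pvStepA_good (J MI F MP : List Int) (st : Int × Int × Int) (i : Int)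
    (h : pvGoodJet J F MP i = true) :
    pvStepA J MI F MP st i =
      (if st.1 = -123 then (i, st.2.1, st.2.2 + 1)
       else if PySem.List.pyGetD MI (PySem.List.pyGetD J st.1 0) 0
             = PySem.List.pyGetD MI (PySem.List.pyGetD J i 0) 0 then (st.1, i, st.2.2 + 1)
       else (st.1, st.2.1, st.2.2 + 1)) := by
  unfold pvStepA
  unfold pvGoodJet at h
  simp only [Bool.and_eq_true, beq_iff_eq, decide_eq_true_eq] at h
  obtain ⟨⟨h1, h2⟩, h3⟩ := h
  rw [if_pos h1, if_pos (by exact_mod_cast h2), if_pos h3]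

-- no good jet left: A's loop leaves the state unchanged
lemma pvFoldA_none (J MI F MP : List Int) :
    ∀ (l : List Int) (st : Int × Int × Int), l.filter (pvGoodJet J F MP) = [] →
      l.foldl (pvStepA J MI F MP) st = st := by
  intro l
  induction l with
  | nil => intro st _; rfl
  | cons a t ih =>
    intro st hf
    rw [List.filter_cons] at hf
    by_cases hg : pvGoodJet J F MP a = true
    · simp [hg] at hf
    · simp only [List.foldl_cons,
        pvStepA_not_good J MI F MP st a (Bool.not_eq_true _ ▸ hg)]
      exact ih st (by simpa [hg] using hf)

-- exactly one good jet left, after the first match (idx1 ≥ 0, so idx1 ≠ -123)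
lemma pvFoldA_one (J MI F MP : List Int) :
    ∀ (l : List Int) (idx1 idx2 n j : Int), 0 ≤ idx1 →
      l.filter (pvGoodJet J F MP) = [j] →
      l.foldl (pvStepA J MI F MP) (idx1, idx2, n) =
        (idx1,
         if PySem.List.pyGetD MI (PySem.List.pyGetD J idx1 0) 0
          = PySem.List.pyGetD MI (PySem.List.pyGetD J j 0) 0 then j else idx2,
         n + 1) := by
  intro l
  induction l with
  | nil => intro idx1 idx2 n j _ hf; simp at hf
  | cons a t ih =>
    intro idx1 idx2 n j h1 hf
    rw [List.filter_cons] at hf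
    by_cases hg : pvGoodJet J F MP a = true
    · simp only [hg, if_pos] at hf
      obtain ⟨rfl, hrest⟩ : a = j ∧ t.filter (pvGoodJet J F MP) = [] := by
        simpa using hf
      have hne : idx1 ≠ -123 := by omega
      rw [List.foldl_cons, pvStepA_good J MI F MP _ _ hg]
      simp only [if_neg hne]
      by_cases hm : PySem.List.pyGetD MI (PySem.List.pyGetD J idx1 0) 0
          = PySem.List.pyGetD MI (PySem.List.pyGetD J a 0) 0
      · rw [if_pos hm, if_pos hm, pvFoldA_none J MI F MP t _ hrest]
      · rw [if_neg hm, if_neg hm, pvFoldA_none J MI F MP t _ hrest]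
    · rw [List.foldl_cons, pvStepA_not_good J MI F MP _ a (Bool.not_eq_true _ ▸ hg)]
      exact ih idx1 idx2 n j h1 (by simpa [hg] using hf)

-- main characterisation of A's loop from the fresh start state, via the filtered list
lemma pvFoldA_main (J MI F MP : List Int) :
    ∀ (l : List Int), (∀ x ∈ l, (0:Int) ≤ x) → (l.filter (pvGoodJet J F MP)).length ≤ 2 →
      (fun st : Int × Int × Int => (st.1, st.2.1))
          (l.foldl (pvStepA J MI F MP) (-123, -124, 0)) =
        (match l.filter (pvGoodJet J F MP) with | [] => (-123 : Int) | x :: _ => x,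
         match l.filter (pvGoodJet J F MP) with
         | [a, b] =>
             if PySem.List.pyGetD MI (PySem.List.pyGetD J a 0) 0
              = PySem.List.pyGetD MI (PySem.List.pyGetD J b 0) 0 then b else (-124 : Int)
         | _ => (-124 : Int)) := by
  intro l
  induction l with
  | nil => intro _ _; rfl
  | cons a t ih =>
    intro hpos hlen
    rw [List.filter_cons] at hlen ⊢
    by_cases hg : pvGoodJet J F MP a = true
    · have ha : (0:Int) ≤ a := hpos a (List.mem_cons_self ..)
      simp only [hg, if_pos] at hlen ⊢
      rw [List.foldl_cons, pvStepA_good J MI F MP _ _ hg]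
      rw [if_pos rfl]
      have hred : (a, ((-123:Int), (-124:Int), (0:Int)).2.1,
          ((-123:Int), (-124:Int), (0:Int)).2.2 + 1) = (a, (-124:Int), (1:Int)) := rfl
      rw [hred]
      cases hfl : t.filter (pvGoodJet J F MP) with
      | nil => rw [pvFoldA_none J MI F MP t _ hfl]
      | cons j rest =>
        have hrl : rest = [] := by
          rw [hfl] at hlen
          simp only [List.length_cons] at hlen
          exact List.eq_nil_of_length_eq_zero (by omega)
        subst hrl
        rw [pvFoldA_one J MI F MP t a (-124) 1 j ha hfl]
    · rw [List.foldl_cons, pvStepA_not_good J MI F MP _ a (Bool.not_eq_true _ ▸ hg)]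
      simp only [hg, Bool.false_eq_true, if_false]
      exact ih (fun x hx => hpos x (List.mem_cons_of_mem _ hx)) (by simpa [hg] using hlen)

-- find? is the head of the filtered list
lemma pvFind?_eq_head?_filter {α : Type} (p : α → Bool) (l : List α) :
    l.find? p = (l.filter p).head? := by
  induction l with
  | nil => rfl
  | cons a t ih =>
    cases h : p a
    · rw [List.find?_cons_of_neg (by simp [h]), List.filter_cons_of_neg (by simp [h]), ih]
    · rw [List.find?_cons_of_pos h, List.filter_cons_of_pos h, List.head?_cons]

-- if the first good index of range [0,n) is a, the good indices of range (a,n) are the rest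
lemma pvFilter_tail (J F MP : List Int) (n a : Int) (rest : List Int)
    (hf : (PySem.List.pyRange 0 n 1).filter (pvGoodJet J F MP) = a :: rest) :
    (PySem.List.pyRange (a + 1) n 1).filter (pvGoodJet J F MP) = rest := by
  have ha : a ∈ PySem.List.pyRange 0 n 1 :=
    List.mem_of_mem_filter (hf ▸ List.mem_cons_self ..)
  obtain ⟨ha0, han⟩ := PySem.List.mem_pyRange_one.mp ha
  have hsplit : PySem.List.pyRange 0 n 1
      = PySem.List.pyRange 0 (a + 1) 1 ++ PySem.List.pyRange (a + 1) n 1 :=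
    PySem.List.pyRange_one_append 0 (a + 1) n (by omega) (by omega)
  have hsucc : PySem.List.pyRange 0 (a + 1) 1 = PySem.List.pyRange 0 a 1 ++ [a] :=
    PySem.List.pyRange_one_succ_right ha0
  have hga : pvGoodJet J F MP a = true := List.of_mem_filter (hf ▸ List.mem_cons_self ..)
  rw [hsplit, hsucc, List.filter_append, List.filter_append] at hf
  have hpre : (PySem.List.pyRange 0 a 1).filter (pvGoodJet J F MP) = [] := by
    cases hp : (PySem.List.pyRange 0 a 1).filter (pvGoodJet J F MP) with
    | nil => rfl
    | cons y ys =>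
      exfalso
      rw [hp] at hf
      have hy : y = a := by simpa using congrArg List.head? hf
      have : y ∈ PySem.List.pyRange 0 a 1 :=
        List.mem_of_mem_filter (hp ▸ List.mem_cons_self ..)
      have := (PySem.List.mem_pyRange_one.mp this).2
      omega
  rw [hpre] at hf
  simpa [hga] using hf

-- ===== VERDICT (by name: the statement is the Claim_ definition above) =====
theorem getTrueJets_spec : Claim_equal_getTrueJets := by
  intro nJet J MI F MP _ hpre
  unfold Spec_getTrueJets getTrueJets_alt
  obtain ⟨-, -, hcnt, -⟩ := hpre
  unfold pvGoods at hcnt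
  have hport : getTrueJets nJet J MI F MP =
      (fun st : Int × Int × Int => (st.1, st.2.1))
        ((PySem.List.pyRange 0 nJet 1).foldl (pvStepA J MI F MP) (-123, -124, 0)) := rfl
  have hpos : ∀ x ∈ PySem.List.pyRange 0 nJet 1, (0 : Int) ≤ x := by
    intro x hx
    exact (PySem.List.mem_pyRange_one.mp hx).1
  rw [hport, pvFoldA_main J MI F MP (PySem.List.pyRange 0 nJet 1) hpos hcnt]
  rw [pvFind?_eq_head?_filter]
  cases hfl : (PySem.List.pyRange 0 nJet 1).filter (pvGoodJet J F MP) with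
  | nil => rfl
  | cons a rest =>
    simp only [List.head?_cons]
    rw [pvFind?_eq_head?_filter, pvFilter_tail J F MP nJet a rest hfl]
    cases rest with
    | nil => rfl
    | cons b rest2 =>
      have : rest2 = [] := by
        rw [hfl] at hcnt
        simp only [List.length_cons] at hcnt
        exact List.eq_nil_of_length_eq_zero (by omega)
      subst this
      simp only [List.head?_cons]
      by_cases hm : PySem.List.pyGetD MI (PySem.List.pyGetD J a 0) 0
          = PySem.List.pyGetD MI (PySem.List.pyGetD J b 0) 0
      · simp [hm]
      · simp [hm]
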